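-- pv_equiv track=rewrite | github.com/MihKorostelev/testjean | status.py | get_job
-- ===== SOURCE A (Python) =====
-- def get_job(text):
--     name_job = ''
--     number = 0
--     for count in range(0,(len(text))):
--         if text[count] == '@' :
--             number = count
--     for count in range(number+1,len(text)):
--         name_job +=text[count]
--     return name_job
-- ===== SOURCE B (Python) =====
-- def get_job(text):
--     number = 0
--     for count in range(len(text) - 1, -1, -1):
--         if text[count] == '@':
--             number = count
--             break
--     return text[number + 1:]
-- ===== Notes on version B (the rewrite author's own statement) =====
-- stated objective: faster
-- what changed: Replaces A's full forward scan (keeping the last '@' index) plus a per-character string-building loop with a single backward early-exit scan for the last '@' followed by one slice; the number=0 initialisation keeps the no-'@' case returning text[1:].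
import Mathlib
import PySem

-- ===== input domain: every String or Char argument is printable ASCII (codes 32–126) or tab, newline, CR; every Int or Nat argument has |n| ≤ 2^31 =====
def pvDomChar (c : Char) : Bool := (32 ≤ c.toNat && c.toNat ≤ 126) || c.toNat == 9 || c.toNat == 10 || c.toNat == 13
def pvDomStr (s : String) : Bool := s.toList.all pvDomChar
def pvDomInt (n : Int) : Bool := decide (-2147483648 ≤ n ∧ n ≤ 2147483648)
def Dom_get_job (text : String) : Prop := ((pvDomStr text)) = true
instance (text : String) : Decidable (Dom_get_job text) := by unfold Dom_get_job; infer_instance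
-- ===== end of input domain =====

-- B replaces A's forward full scan + per-character rebuild with a backward early-exit scan and one slice (alternative decomposition, return value only).

-- ===== PORT A =====
-- forward loop keeping the LAST '@' index, then a char-by-char building loop
def get_job (text : String) : String :=
  let cs := text.toList
  let number : Int :=
    (PySem.List.pyRange 0 (PySem.Str.len text) 1).foldl
      (fun number count => if PySem.List.pyGetD cs count ' ' = '@' then count else number) 0
  let name_job : List Char :=
    (PySem.List.pyRange (number + 1) (PySem.Str.len text) 1).foldl
      (fun acc count => acc ++ [PySem.List.pyGetD cs count ' ']) []
  String.ofList name_job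

-- ===== PORT B =====
-- backward scan with break (structural recursion over the countdown range), then a slice
def get_job_findBack (cs : List Char) : List Int → Int
  | [] => 0
  | c :: rest => if PySem.List.pyGetD cs c ' ' = '@' then c else get_job_findBack cs rest

def get_job_alt (text : String) : String :=
  let cs := text.toList
  let number := get_job_findBack cs (PySem.List.pyRange (PySem.Str.len text - 1) (-1) (-1))
  String.ofList (PySem.List.slice cs (some (number + 1)) none)

-- ===== PRECONDITION & SPEC =====
def Spec_get_job (text : String) (out : String) : Prop := out = get_job_alt text
instance (text : String) (out : String) : Decidable (Spec_get_job text out) := by unfold Spec_get_job; infer_instance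

-- ===== CLAIM (what is proved, stated in full; the proofs are below) =====
def Claim_equal_get_job : Prop := ∀ (text : String), Dom_get_job text → Spec_get_job text (get_job text)

-- ===== LEMMAS AND PROOFS =====

-- A's forward last-'@' fold equals B's backward first-'@' scan, and both are nonnegative.
theorem get_job_loop_eq (cs : List Char) (n : Nat) :
    (PySem.List.pyRange 0 (n : Int) 1).foldl
      (fun number count => if PySem.List.pyGetD cs count ' ' = '@' then count else number) 0
      = get_job_findBack cs (PySem.List.pyRange ((n : Int) - 1) (-1) (-1)) := by
  induction n with
  | zero => simp [PySem.List.pyRange_one_eq_nil, PySem.List.pyRange_neg_one_eq_nil, get_job_findBack]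
  | succ n ih =>
    have h1 : ((n + 1 : Nat) : Int) = (n : Int) + 1 := by push_cast; ring
    rw [h1, PySem.List.pyRange_one_succ_right (by positivity), List.foldl_append]
    have h2 : (n : Int) + 1 - 1 = (n : Int) := by ring
    rw [h2, PySem.List.pyRange_neg_one_cons (by omega)]
    simp only [List.foldl, get_job_findBack, ih]

theorem get_job_loop_nonneg (cs : List Char) (n : Nat) :
    0 ≤ (PySem.List.pyRange 0 (n : Int) 1).foldl
      (fun number count => if PySem.List.pyGetD cs count ' ' = '@' then count else number) 0 := by
  induction n with
  | zero => simp [PySem.List.pyRange_one_eq_nil]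
  | succ n ih =>
    have h1 : ((n + 1 : Nat) : Int) = (n : Int) + 1 := by push_cast; ring
    rw [h1, PySem.List.pyRange_one_succ_right (by positivity), List.foldl_append]
    simp only [List.foldl]
    split_ifs
    · positivity
    · exact ih

-- A's second loop (append one char per index) equals the slice text[number+1:].
theorem get_job_tail_eq (cs : List Char) (m : Int) (hm : 0 ≤ m) :
    (PySem.List.pyRange m (cs.length : Int) 1).foldl
      (fun acc count => acc ++ [PySem.List.pyGetD cs count ' ']) []
      = PySem.List.slice cs (some m) none := by
  rw [PySem.List.foldl_append_singleton_eq_map, PySem.List.map_pyGetD_pyRange' cs ' ' hm,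
    PySem.List.slice_from cs hm]
  simp

theorem get_job_spec_aux (text : String) : get_job text = get_job_alt text := by
  unfold get_job get_job_alt
  simp only [PySem.Str.len]
  set cs := text.toList with hcs
  have h := get_job_loop_eq cs cs.length
  have h0 := get_job_loop_nonneg cs cs.length
  rw [← h]
  congr 1
  exact get_job_tail_eq cs _ (by omega)

-- ===== VERDICT (by name: the statement is the Claim_ definition above) =====
theorem get_job_spec : Claim_equal_get_job := by
  intro text _
  exact get_job_spec_aux text
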